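-- pv_equiv track=rewrite | github.com/LuckySting/Oozie-parsing-tool | parsing_tool.py | replace_alias
-- ===== SOURCE A (Python) =====
-- from typing import List, Dict, Generator, Any, Set, Union
--
-- def replace_alias(identifies: List[str]) -> List[str]:
--     identifies = [i.lower().replace('stored as parquet', ' ').replace(' as ', ' ') for i in identifies]
--     alias_table: Dict[str, str] = {i.split(' ')[-1]: i.split(' ')[0] for i in identifies}
--     tables: List[str] = []
--     for alias in alias_table:
--         current_alias: str = alias
--         while current_alias in alias_table:
--             if current_alias == alias_table[current_alias]:
--                 break
--             current_alias = alias_table[current_alias]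
--         if current_alias not in tables:
--             tables.append(current_alias)
--     return tables
-- ===== SOURCE B (Python) =====
-- def replace_alias(identifies):
--     identifies = [i.lower().replace('stored as parquet', ' ').replace(' as ', ' ') for i in identifies]
--     alias_table = {i.split(' ')[-1]: i.split(' ')[0] for i in identifies}
--     resolved = {}
--     tables = []
--     seen = set()
--     for alias in alias_table:
--         # follow the chain, recording the path, until a cached or terminal name
--         path = []
--         a = alias
--         while a not in resolved:
--             nxt = alias_table.get(a)
--             if nxt is None or nxt == a:
--                 resolved[a] = a
--                 break
--             path.append(a)
--             a = nxt
--         t = resolved[a]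
--         for p in path:  # path compression: cache every name on the chain
--             resolved[p] = t
--         if t not in seen:
--             seen.add(t)
--             tables.append(t)
--     return tables
-- ===== Notes on version B (the rewrite author's own statement) =====
-- stated objective: faster
-- what changed: B resolves each name once by memoizing the terminal of every alias chain with path compression (a resolved cache consulted and extended during the walk) and dedups the output through a seen-set, instead of A's re-walking the whole chain and re-scanning the output list for every key.
import Mathlib
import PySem

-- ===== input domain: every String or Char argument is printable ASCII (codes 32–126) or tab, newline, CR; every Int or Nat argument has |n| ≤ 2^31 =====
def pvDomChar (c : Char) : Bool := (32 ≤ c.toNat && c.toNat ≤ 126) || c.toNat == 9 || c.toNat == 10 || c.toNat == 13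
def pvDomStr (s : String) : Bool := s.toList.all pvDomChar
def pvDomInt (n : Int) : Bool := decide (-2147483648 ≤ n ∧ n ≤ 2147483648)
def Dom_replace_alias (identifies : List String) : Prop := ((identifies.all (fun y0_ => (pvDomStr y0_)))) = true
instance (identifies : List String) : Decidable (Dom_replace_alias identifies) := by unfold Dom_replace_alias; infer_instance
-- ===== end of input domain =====

-- B memoizes resolved terminals with path compression (one amortized chain walk per name) instead of
-- re-walking the alias chain from scratch for every key; equivalence is about the return value only.

-- shared preprocessing (identical first two lines of A and B):
-- identifies = [i.lower().replace('stored as parquet', ' ').replace(' as ', ' ') for i in identifies]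
def pvPrep (identifies : List String) : List String :=
  identifies.map (fun i =>
    PySem.Str.replace (PySem.Str.replace (PySem.Str.lower i) "stored as parquet" " ") " as " " ")

-- alias_table = {i.split(' ')[-1]: i.split(' ')[0] for i in identifies}
-- (split(' ') always yields a nonempty list, so the [-1]/[0] indexings never raise; pyGetD is exact here)
-- split? returns some since the separator " " is nonempty, so the getD [] never fires
def pvTable (identifies : List String) : PySem.Dict String String :=
  (pvPrep identifies).foldl (fun d i =>
    d.insert (PySem.List.pyGetD ((PySem.Str.split? i " ").getD []) (-1) "")
             (PySem.List.pyGetD ((PySem.Str.split? i " ").getD []) 0 "")) PySem.Dict.empty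

-- ===== PORT A =====
-- the 'while current_alias in alias_table' loop; fuel tbl.size + 1 suffices on every input
-- admitted by Pre_replace_alias (the chain visits distinct keys, so it has at most tbl.size hops)
def chaseA (tbl : PySem.Dict String String) : Nat → String → String
  | 0, c => c
  | f + 1, c =>
    match tbl.get? c with
    | none => c
    | some y => if c = y then c else chaseA tbl f y

def replace_alias (identifies : List String) : List String :=
  let tbl := pvTable identifies
  tbl.keys.foldl (fun tables al =>
    let c := chaseA tbl (tbl.size + 1) al
    if tables.contains c then tables else tables ++ [c]) []

-- ===== PORT B =====
-- the 'while a not in resolved' loop of B: walk to a cached or terminal name collecting the path,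
-- then write every path element into the cache (path compression); same fuel bound as A's loop
def resolveB (tbl : PySem.Dict String String) :
    Nat → PySem.Dict String String → String → List String → String × PySem.Dict String String
  | 0, cache, a, _ => (a, cache)
  | f + 1, cache, a, path =>
    match cache.get? a with
    | some t => (t, path.foldl (fun c p => c.insert p t) cache)
    | none =>
      match tbl.get? a with
      | some nxt =>
        if nxt = a then (a, path.foldl (fun c p => c.insert p a) (cache.insert a a))
        else resolveB tbl f cache nxt (path ++ [a])
      | none => (a, path.foldl (fun c p => c.insert p a) (cache.insert a a))

def replace_alias_alt (identifies : List String) : List String :=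
  let tbl := pvTable identifies
  (tbl.keys.foldl (fun (st : (PySem.Dict String String × PySem.Set String) × List String) al =>
      match resolveB tbl (tbl.size + 1) st.1.1 al [] with
      | (t, cache) =>
        if PySem.Set.contains st.1.2 t then ((cache, st.1.2), st.2)
        else ((cache, PySem.Set.add st.1.2 t), st.2 ++ [t]))
    ((PySem.Dict.empty, PySem.Set.empty), [])).2

-- ===== PRECONDITION & SPEC =====
-- one step of the alias chain (terminal names are exactly its fixed points)
def pvStep (tbl : PySem.Dict String String) (x : String) : String := (tbl.get? x).getD x

-- Pre_ excludes inputs whose alias table contains a cycle of length ≥ 2 (e.g. ['a b', 'b a']):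
-- there A's while loop never terminates (and B's loop likewise), so A returns no value.
def Pre_replace_alias (identifies : List String) : Prop :=
  ∀ a ∈ (pvTable identifies).keys,
    pvStep (pvTable identifies) ((pvStep (pvTable identifies))^[(pvTable identifies).size] a)
      = (pvStep (pvTable identifies))^[(pvTable identifies).size] a

instance (identifies : List String) : Decidable (Pre_replace_alias identifies) := by
  unfold Pre_replace_alias; infer_instance

def pvWitness_replace_alias : List String := ["a"]

def Spec_replace_alias (identifies : List String) (out : List String) : Prop := out = replace_alias_alt identifies
instance (identifies : List String) (out : List String) : Decidable (Spec_replace_alias identifies out) := by unfold Spec_replace_alias; infer_instance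

-- ===== CLAIM (what is proved, stated in full; the proofs are below) =====
def Claim_equal_replace_alias : Prop := ∀ (identifies : List String), Dom_replace_alias identifies → Pre_replace_alias identifies → Spec_replace_alias identifies (replace_alias identifies)

-- ===== LEMMAS AND PROOFS =====

-- the terminal a chain eventually reaches (well defined on inputs satisfying Pre_)
def pvLim (tbl : PySem.Dict String String) (x : String) : String :=
  (pvStep tbl)^[tbl.size] x

-- invariant of B's memo cache: every cached value is the correct terminal
def pvGood (tbl cache : PySem.Dict String String) : Prop :=
  ∀ x t, cache.get? x = some t → t = pvLim tbl x

theorem pv_iter_fix {tbl : PySem.Dict String String} {k : Nat} {x : String}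
    (hfix : pvStep tbl ((pvStep tbl)^[k] x) = (pvStep tbl)^[k] x) :
    ∀ m, k ≤ m → (pvStep tbl)^[m] x = (pvStep tbl)^[k] x := by
  intro m hm
  obtain ⟨j, rfl⟩ := Nat.exists_eq_add_of_le hm
  induction j with
  | zero => rfl
  | succ j ih =>
    calc (pvStep tbl)^[k + (j + 1)] x
        = pvStep tbl ((pvStep tbl)^[k + j] x) := Function.iterate_succ_apply' _ _ _
      _ = pvStep tbl ((pvStep tbl)^[k] x) := by rw [ih (by omega)]
      _ = (pvStep tbl)^[k] x := hfix

theorem pv_lim_eq {tbl : PySem.Dict String String} {k : Nat} {x : String}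
    (hk : k ≤ tbl.size)
    (hfix : pvStep tbl ((pvStep tbl)^[k] x) = (pvStep tbl)^[k] x) :
    pvLim tbl x = (pvStep tbl)^[k] x :=
  pv_iter_fix hfix _ hk

-- a fixed point reached after one step of the chain
theorem pv_fix_pred {tbl : PySem.Dict String String} {k : Nat} {x y : String}
    (hk0 : k ≠ 0) (hstep : pvStep tbl x = y)
    (hfix : pvStep tbl ((pvStep tbl)^[k] x) = (pvStep tbl)^[k] x) :
    pvStep tbl ((pvStep tbl)^[k - 1] y) = (pvStep tbl)^[k - 1] y := by
  have h : (pvStep tbl)^[k] x = (pvStep tbl)^[k - 1] y := by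
    conv_lhs => rw [show k = (k - 1) + 1 by omega]
    rw [Function.iterate_succ_apply, hstep]
  rw [← h]; exact hfix

theorem pv_lim_step {tbl : PySem.Dict String String} {k : Nat} {x : String}
    (hk : k ≤ tbl.size)
    (hfix : pvStep tbl ((pvStep tbl)^[k] x) = (pvStep tbl)^[k] x) :
    pvLim tbl (pvStep tbl x) = pvLim tbl x := by
  rcases Nat.eq_zero_or_pos k with rfl | hkpos
  · simp only [Function.iterate_zero, id_eq] at hfix
    rw [hfix]
  · have hfix' := pv_fix_pred (y := pvStep tbl x) (by omega) rfl hfix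
    rw [pv_lim_eq (k := k - 1) (by omega) hfix', pv_lim_eq hk hfix,
        ← Function.iterate_succ_apply]
    congr 1; omega

theorem pv_chase_eq {tbl : PySem.Dict String String} :
    ∀ (F k : Nat) (x : String), k ≤ F → k ≤ tbl.size →
      pvStep tbl ((pvStep tbl)^[k] x) = (pvStep tbl)^[k] x →
      chaseA tbl F x = pvLim tbl x := by
  intro F
  induction F with
  | zero =>
    intro k x hkF hkN hfix
    interval_cases k
    simp only [Function.iterate_zero, id_eq] at hfix
    rw [pv_lim_eq (k := 0) (Nat.zero_le _) (by simpa using hfix)]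
    simp [chaseA]
  | succ F ih =>
    intro k x hkF hkN hfix
    unfold chaseA
    cases hg : tbl.get? x with
    | none =>
      have hx : pvStep tbl x = x := by simp [pvStep, hg]
      rw [pv_lim_eq (k := 0) (Nat.zero_le _) (by simpa using hx)]
      simp
    | some y =>
      by_cases hxy : x = y
      · subst hxy
        have hx : pvStep tbl x = x := by simp [pvStep, hg]
        rw [pv_lim_eq (k := 0) (Nat.zero_le _) (by simpa using hx)]
        simp
      · simp only [if_neg hxy]
        have hstep : pvStep tbl x = y := by simp [pvStep, hg]
        have hk0 : k ≠ 0 := by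
          rintro rfl
          simp only [Function.iterate_zero, id_eq] at hfix
          rw [hstep] at hfix; exact hxy hfix.symm
        rw [ih (k - 1) y (by omega) (by omega) (pv_fix_pred hk0 hstep hfix),
            ← pv_lim_step (k := k) hkN hfix, hstep]

theorem pv_good_writes {tbl : PySem.Dict String String} {t : String} :
    ∀ (path : List String) (cache : PySem.Dict String String),
      pvGood tbl cache → (∀ p ∈ path, t = pvLim tbl p) →
      pvGood tbl (path.foldl (fun c p => c.insert p t) cache) := by
  intro path
  induction path with
  | nil => intro cache hG _; simpa using hG
  | cons q qs ih =>
    intro cache hG hP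
    simp only [List.foldl_cons]
    refine ih _ ?_ (fun r hr => hP r (List.mem_cons_of_mem _ hr))
    intro x u hx
    rw [PySem.Dict.get?_insert] at hx
    split_ifs at hx with hxq
    · simp only [Option.some.injEq] at hx
      subst hx
      rw [hxq]
      exact hP q List.mem_cons_self
    · exact hG x u hx

-- one extra write of a terminal into the cache keeps the invariant
theorem pv_good_insert_term {tbl cache : PySem.Dict String String} {a : String}
    (hG : pvGood tbl cache) (ha : pvLim tbl a = a) :
    pvGood tbl (cache.insert a a) := by
  intro x u hx
  rw [PySem.Dict.get?_insert] at hx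
  split_ifs at hx with hxa
  · simp only [Option.some.injEq] at hx
    subst hxa; rw [← hx, ha]
  · exact hG x u hx

theorem pv_resolve_spec {tbl : PySem.Dict String String} :
    ∀ (f : Nat) (a : String) (k : Nat) (cache : PySem.Dict String String) (path : List String),
      k < f → k ≤ tbl.size →
      pvStep tbl ((pvStep tbl)^[k] a) = (pvStep tbl)^[k] a →
      pvGood tbl cache → (∀ p ∈ path, pvLim tbl p = pvLim tbl a) →
      ∃ C, resolveB tbl f cache a path = (pvLim tbl a, C) ∧ pvGood tbl C := by
  intro f
  induction f with
  | zero => intro a k _ _ hk; omega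
  | succ f ih =>
    intro a k cache path hkf hkN hfix hG hP
    unfold resolveB
    cases hc : cache.get? a with
    | some t =>
      have ht := hG a t hc
      subst ht
      exact ⟨_, rfl, pv_good_writes path cache hG (fun p hp => (hP p hp).symm)⟩
    | none =>
      have hterm : pvStep tbl a = a → pvLim tbl a = a := fun hx =>
        pv_lim_eq (k := 0) (Nat.zero_le _) (by simpa using hx)
      cases hg : tbl.get? a with
      | none =>
        have hl : pvLim tbl a = a := hterm (by simp [pvStep, hg])
        refine ⟨_, by rw [hl], ?_⟩
        exact pv_good_writes path _ (pv_good_insert_term hG hl)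
          (fun p hp => by rw [hP p hp, hl])
      | some nxt =>
        by_cases hna : nxt = a
        · subst hna
          have hl : pvLim tbl nxt = nxt := hterm (by simp [pvStep, hg])
          refine ⟨List.foldl (fun c p => c.insert p nxt) (cache.insert nxt nxt) path,
            by simp [hl], ?_⟩
          exact pv_good_writes path _ (pv_good_insert_term hG hl)
            (fun p hp => by rw [hP p hp, hl])
        · simp only [if_neg hna]
          have hstep : pvStep tbl a = nxt := by simp [pvStep, hg]
          have hk0 : k ≠ 0 := by
            rintro rfl
            simp only [Function.iterate_zero, id_eq] at hfix
            rw [hstep] at hfix; exact hna hfix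
          have hlim : pvLim tbl nxt = pvLim tbl a := by
            rw [← hstep]; exact pv_lim_step hkN hfix
          have hPall : ∀ p ∈ path ++ [a], pvLim tbl p = pvLim tbl nxt := by
            intro p hp
            rcases List.mem_append.mp hp with hp | hp
            · rw [hP p hp, hlim]
            · simp only [List.mem_singleton] at hp; subst hp; exact hlim.symm
          obtain ⟨C, hC, hGC⟩ := ih nxt (k - 1) cache (path ++ [a]) (by omega) (by omega)
            (pv_fix_pred hk0 hstep hfix) hG hPall
          exact ⟨C, by rw [hC, hlim], hGC⟩

theorem pv_fold_eq {tbl : PySem.Dict String String} :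
    ∀ (ks : List String) (tables : List String) (cache : PySem.Dict String String)
      (seen : PySem.Set String),
      pvGood tbl cache →
      (∀ x : String, PySem.Set.contains seen x = tables.contains x) →
      (∀ a ∈ ks, pvStep tbl ((pvStep tbl)^[tbl.size] a) = (pvStep tbl)^[tbl.size] a) →
      ks.foldl (fun tables al =>
          let c := chaseA tbl (tbl.size + 1) al
          if tables.contains c then tables else tables ++ [c]) tables
        = (ks.foldl (fun (st : (PySem.Dict String String × PySem.Set String) × List String) al =>
            match resolveB tbl (tbl.size + 1) st.1.1 al [] with
            | (t, cache) =>
              if PySem.Set.contains st.1.2 t then ((cache, st.1.2), st.2)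
              else ((cache, PySem.Set.add st.1.2 t), st.2 ++ [t]))
          ((cache, seen), tables)).2 := by
  intro ks
  induction ks with
  | nil => intro tables cache seen _ _ _; rfl
  | cons a ks ih =>
    intro tables cache seen hG hseen hall
    have hfix := hall a List.mem_cons_self
    obtain ⟨C, hC, hGC⟩ := pv_resolve_spec (tbl.size + 1) a tbl.size cache []
      (Nat.lt_succ_self _) (le_refl _) hfix hG (by simp)
    have hchase : chaseA tbl (tbl.size + 1) a = pvLim tbl a :=
      pv_chase_eq (tbl.size + 1) tbl.size a (Nat.le_succ _) (le_refl _) hfix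
    simp only [List.foldl_cons, hC, hchase, hseen]
    by_cases hct : tables.contains (pvLim tbl a) = true
    · simp only [if_pos hct]
      exact ih _ C seen hGC hseen (fun b hb => hall b (List.mem_cons_of_mem _ hb))
    · have hctf : tables.contains (pvLim tbl a) = false := by
        revert hct; cases tables.contains (pvLim tbl a) <;> simp
      simp only [if_neg hct]
      refine ih _ C _ hGC ?_ (fun b hb => hall b (List.mem_cons_of_mem _ hb))
      intro x
      have hnotin : pvLim tbl a ∉ seen := by
        have h := hseen (pvLim tbl a)
        rw [hctf] at h
        simpa using h
      have hadd : PySem.Set.add seen (pvLim tbl a) = seen ++ [pvLim tbl a] := by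
        simp [PySem.Set.add, hnotin]
      have hsx := hseen x
      rw [hadd]
      simp only [PySem.Set.contains] at hsx ⊢
      simp only [List.contains_eq_mem, decide_eq_decide] at hsx ⊢
      simp [List.mem_append, hsx]

-- ===== VERDICT (by name: the statement is the Claim_ definition above) =====
theorem replace_alias_spec : Claim_equal_replace_alias := by
  intro identifies _ hPre
  unfold Spec_replace_alias replace_alias replace_alias_alt
  exact pv_fold_eq (pvTable identifies).keys [] PySem.Dict.empty PySem.Set.empty
    (by intro x t h; simp [PySem.Dict.get?_empty] at h) (fun _ => rfl) hPre
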